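-- pv_equiv track=rewrite | github.com/maia-proyecto-integrador/coffee-sales-project | src/model/mlflow_utils.py | _mlflow_key
-- ===== SOURCE A (Python) =====
-- def _mlflow_key(k: str) -> str:
--     """Sanitiza nombres de métricas/params para que sean válidos en MLflow."""
--     bad = {
--         '%': 'pct',
--         ' ': '_',
--         '(': '_',
--         ')': '_',
--         ':': '_',
--         ',': '_'
--     }
--     for a, b in bad.items():
--         k = k.replace(a, b)
--     return k
-- ===== SOURCE B (Python) =====
-- def _mlflow_key(k: str) -> str:
--     """Sanitiza nombres de métricas/params para que sean válidos en MLflow."""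
--     bad = {
--         '%': 'pct',
--         ' ': '_',
--         '(': '_',
--         ')': '_',
--         ':': '_',
--         ',': '_'
--     }
--     return ''.join(bad.get(c, c) for c in k)
-- ===== Notes on version B (the rewrite author's own statement) =====
-- stated objective: simpler
-- what changed: Replaces six sequential full-string str.replace scans by a single pass over the characters, emitting each character's mapping (or itself) and joining once.
import Mathlib
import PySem

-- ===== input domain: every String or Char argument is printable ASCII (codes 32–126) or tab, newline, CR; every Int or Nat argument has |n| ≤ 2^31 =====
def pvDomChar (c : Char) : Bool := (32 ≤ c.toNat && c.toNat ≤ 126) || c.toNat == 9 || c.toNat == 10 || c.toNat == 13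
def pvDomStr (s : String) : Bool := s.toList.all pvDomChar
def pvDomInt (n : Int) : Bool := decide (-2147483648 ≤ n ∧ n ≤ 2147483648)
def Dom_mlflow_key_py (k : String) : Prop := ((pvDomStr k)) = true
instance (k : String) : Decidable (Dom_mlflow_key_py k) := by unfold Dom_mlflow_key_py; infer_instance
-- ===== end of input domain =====

-- B replaces six sequential full-string replace scans by one pass over the characters (objective: simpler).

-- ===== PORT A =====
-- the literal dict of A, as a PySem.Dict in insertion order
def pvBadA : PySem.Dict String String :=
  ((((((PySem.Dict.empty).insert "%" "pct").insert " " "_").insert "(" "_").insert ")" "_").insert ":" "_").insert "," "_"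

def mlflow_key_py (k : String) : String :=
  pvBadA.items.foldl (fun s ab => PySem.Str.replace s ab.1 ab.2) k

-- ===== PORT B =====
-- B's dict, keyed by the single characters (Source B iterates characters and looks each up with .get(c, c))
def pvBadB : PySem.Dict Char String :=
  ((((((PySem.Dict.empty).insert '%' "pct").insert ' ' "_").insert '(' "_").insert ')' "_").insert ':' "_").insert ',' "_"

def mlflow_key_py_alt (k : String) : String :=
  PySem.Str.join "" (k.toList.map (fun c => pvBadB.getD c (String.ofList [c])))

-- ===== PRECONDITION & SPEC =====
def Spec_mlflow_key_py (k : String) (out : String) : Prop := out = mlflow_key_py_alt k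
instance (k : String) (out : String) : Decidable (Spec_mlflow_key_py k out) := by unfold Spec_mlflow_key_py; infer_instance

-- ===== CLAIM (what is proved, stated in full; the proofs are below) =====
def Claim_equal_mlflow_key_py : Prop := ∀ (k : String), Dom_mlflow_key_py k → Spec_mlflow_key_py k (mlflow_key_py k)

-- ===== LEMMAS AND PROOFS =====

-- per-character replacement function of a single-char replace
def repl1 (a : Char) (new : List Char) (c : Char) : List Char := if c = a then new else [c]

lemma go_single (a : Char) (new : List Char) :
    ∀ (fuel : Nat) (l acc : List Char), l.length ≤ fuel →
      PySem.Chars.replace.go [a] new fuel l acc = acc.reverse ++ l.flatMap (repl1 a new) := by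
  intro fuel
  induction fuel with
  | zero =>
    intro l acc h
    have : l = [] := List.eq_nil_of_length_eq_zero (Nat.le_zero.mp h)
    subst this; simp [PySem.Chars.replace.go]
  | succ n ih =>
    intro l acc h
    cases l with
    | nil => simp [PySem.Chars.replace.go]
    | cons c t =>
      simp only [PySem.Chars.replace.go]
      have hpre : ([a].isPrefixOf (c :: t)) = (a == c) := by
        simp [List.isPrefixOf]
      by_cases hc : c = a
      · subst hc
        rw [hpre]
        simp only [beq_self_eq_true, if_true, List.length_cons, List.length_nil,
          List.drop_succ_cons, List.drop_zero]
        rw [ih t (new.reverse ++ acc) (by simpa using Nat.le_of_succ_le_succ h)]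
        simp [repl1, List.flatMap_cons]
      · rw [hpre]
        have hne : (a == c) = false := beq_eq_false_iff_ne.mpr (Ne.symm hc)
        rw [hne]
        simp only [Bool.false_eq_true, if_false]
        rw [ih t (c :: acc) (by simpa using Nat.le_of_succ_le_succ h)]
        simp [repl1, hc, List.flatMap_cons]

lemma replace_single (a : Char) (new s : List Char) :
    PySem.Chars.replace s [a] new = s.flatMap (repl1 a new) := by
  have h : PySem.Chars.replace s [a] new = PySem.Chars.replace.go [a] new s.length s [] := by
    simp [PySem.Chars.replace]
  rw [h, go_single a new s.length s [] le_rfl]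
  simp

lemma flatten_intersperse_nil (L : List (List Char)) :
    (List.intersperse ([] : List Char) L).flatten = L.flatten := by
  induction L with
  | nil => rfl
  | cons x t ih =>
    cases t with
    | nil => rfl
    | cons y s =>
      simp only [List.intersperse, List.flatten_cons] at ih ⊢
      rw [ih]; simp

lemma intercalate_nil_flatten (L : List (List Char)) :
    List.intercalate ([] : List Char) L = L.flatten := by
  rw [List.intercalate, flatten_intersperse_nil]

-- A's six per-character replacement steps composed
def sixComp (c : Char) : List Char :=
  (((((repl1 '%' "pct".toList c).flatMap (repl1 ' ' "_".toList)).flatMap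
      (repl1 '(' "_".toList)).flatMap (repl1 ')' "_".toList)).flatMap
      (repl1 ':' "_".toList)).flatMap (repl1 ',' "_".toList)

-- the composed per-character function of A's six replaces equals B's per-character lookup
lemma point (c : Char) :
    sixComp c = (pvBadB.getD c (String.ofList [c])).toList := by
  by_cases h1 : c = '%'; · subst h1; decide
  by_cases h2 : c = ' '; · subst h2; decide
  by_cases h3 : c = '('; · subst h3; decide
  by_cases h4 : c = ')'; · subst h4; decide
  by_cases h5 : c = ':'; · subst h5; decide
  by_cases h6 : c = ','; · subst h6; decide
  simp [sixComp, repl1, pvBadB, PySem.Dict.getD, PySem.Dict.get?, PySem.Dict.empty,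
    PySem.Dict.insert, PySem.Dict.contains, h1, h2, h3, h4, h5, h6,
    Ne.symm h1, Ne.symm h2, Ne.symm h3, Ne.symm h4, Ne.symm h5, Ne.symm h6]

lemma toList_A (k : String) :
    (mlflow_key_py k).toList = k.toList.flatMap sixComp := by
  have hitems : pvBadA.items =
      [("%","pct"),(" ","_"),("(","_"),(")","_"),(":","_"),(",","_")] := by decide
  show (pvBadA.items.foldl (fun s ab => PySem.Str.replace s ab.1 ab.2) k).toList
      = k.toList.flatMap sixComp
  rw [hitems]
  simp only [List.foldl_cons, List.foldl_nil, PySem.Str.toList_replace]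
  have h1 : ("%" : String).toList = ['%'] := rfl
  have h2 : (" " : String).toList = [' '] := rfl
  have h3 : ("(" : String).toList = ['('] := rfl
  have h4 : (")" : String).toList = [')'] := rfl
  have h5 : (":" : String).toList = [':'] := rfl
  have h6 : ("," : String).toList = [','] := rfl
  rw [h1, h2, h3, h4, h5, h6]
  simp only [replace_single, List.flatMap_assoc]
  congr 1
  funext c
  simp only [sixComp, List.flatMap_assoc]

lemma toList_B (k : String) :
    (mlflow_key_py_alt k).toList
      = k.toList.flatMap (fun c => (pvBadB.getD c (String.ofList [c])).toList) := by
  show (PySem.Str.join "" (k.toList.map (fun c => pvBadB.getD c (String.ofList [c])))).toList = _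
  rw [PySem.Str.toList_join]
  have : ("" : String).toList = [] := rfl
  rw [this]
  simp only [PySem.Chars.join, intercalate_nil_flatten, List.map_map, List.flatMap_def]
  rfl

-- ===== VERDICT (by name: the statement is the Claim_ definition above) =====
theorem mlflow_key_py_spec : Claim_equal_mlflow_key_py := by
  intro k _
  unfold Spec_mlflow_key_py
  rw [← String.toList_inj, toList_A, toList_B]
  congr 1
  funext c
  exact point c
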